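-- pv_equiv track=rewrite | github.com/the-omega-institute/automath | theory/2026_golden_ratio_driven_scan_projection_generation_recursive_emergence/scripts/exp_path_toggle_scan_closed_form_audit.py | _n_prim
-- ===== SOURCE A (Python) =====
-- from math import comb, gcd
-- from typing import Dict, List, Tuple
--
-- def _prime_factors(n: int) -> Dict[int, int]:
--     n = int(n)
--     if n < 1:
--         raise ValueError("n must be >= 1")
--     f: Dict[int, int] = {}
--     d = 2
--     x = n
--     while d * d <= x:
--         while x % d == 0:
--             f[d] = f.get(d, 0) + 1
--             x //= d
--         d = 3 if d == 2 else d + 2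
--     if x > 1:
--         f[x] = f.get(x, 0) + 1
--     return f
--
-- def _mobius(n: int) -> int:
--     """Möbius μ(n) for n>=1."""
--     if n == 1:
--         return 1
--     fac = _prime_factors(n)
--     for e in fac.values():
--         if e >= 2:
--             return 0
--     return -1 if (len(fac) % 2 == 1) else 1
--
-- def _divisors(n: int) -> List[int]:
--     n = int(n)
--     if n < 1:
--         return []
--     ds = set([1, n])
--     d = 2
--     while d * d <= n:
--         if n % d == 0:
--             ds.add(d)
--             ds.add(n // d)
--         d += 1
--     out = sorted(ds)
--     return out
--
-- def _n_prim(m: int, a: int) -> int: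
--     """Primitive binary necklace count N_prim(m,a)."""
--     m = int(m)
--     a = int(a)
--     if m <= 0:
--         raise ValueError("m must be >= 1")
--     if a < 0 or a > m:
--         return 0
--     g = gcd(m, a)
--     s = 0
--     for e in _divisors(g):
--         s += _mobius(e) * comb(m // e, a // e)
--     if s % m != 0:
--         raise AssertionError("Möbius sum not divisible by m")
--     return int(s // m)
-- ===== SOURCE B (Python) =====
-- from math import comb, gcd
--
--
-- def _n_prim(m: int, a: int) -> int:
--     """Primitive binary necklace count N_prim(m,a)."""
--     m = int(m)
--     a = int(a)
--     if m <= 0: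
--         raise ValueError("m must be >= 1")
--     if a < 0 or a > m:
--         return 0
--     g = gcd(m, a)
--     # distinct primes of g by trial division (strip each prime completely)
--     primes = []
--     x = g
--     d = 2
--     while d * d <= x:
--         if x % d == 0:
--             primes.append(d)
--             while x % d == 0:
--                 x //= d
--         d = 3 if d == 2 else d + 2
--     if x > 1:
--         primes.append(x)
--
--     # inclusion-exclusion over the distinct primes: recursion over the prime
--     # list, accumulating the squarefree divisor dd built so far.
--     def signed_sum(i: int, dd: int) -> int:
--         if i == len(primes):
--             return comb(m // dd, a // dd)
--         return signed_sum(i + 1, dd) - signed_sum(i + 1, dd * primes[i])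
--
--     s = signed_sum(0, 1)
--     if s % m != 0:
--         raise AssertionError("Möbius sum not divisible by m")
--     return s // m
-- ===== Notes on version B (the rewrite author's own statement) =====
-- stated objective: alternative
-- what changed: A enumerates ALL divisors of gcd(m,a) by trial division and recomputes the Moebius function of each divisor by refactorising it; B factors g once into its distinct primes and runs an inclusion-exclusion recursion over that prime list (each squarefree divisor visited once with its sign), never building a divisor list nor calling a Moebius routine.
import Mathlib
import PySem

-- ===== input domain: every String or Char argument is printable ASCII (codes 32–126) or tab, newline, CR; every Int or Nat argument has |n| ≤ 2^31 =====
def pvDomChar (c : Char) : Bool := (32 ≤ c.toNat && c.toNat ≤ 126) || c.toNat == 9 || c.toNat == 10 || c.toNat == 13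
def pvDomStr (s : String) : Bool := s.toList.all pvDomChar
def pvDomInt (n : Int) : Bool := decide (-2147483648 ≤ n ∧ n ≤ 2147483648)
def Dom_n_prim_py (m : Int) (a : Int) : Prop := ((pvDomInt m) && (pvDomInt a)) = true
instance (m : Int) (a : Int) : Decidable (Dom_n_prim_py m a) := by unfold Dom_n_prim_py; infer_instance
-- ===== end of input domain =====

-- B replaces A's divisor-list + per-divisor Moebius refactorisation by a single factorisation of
-- gcd(m,a) into distinct primes followed by an inclusion-exclusion recursion over that prime list.
-- Both the AssertionError branch ('Moebius sum not divisible by m') of A and of B is mathematically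
-- unreachable (the ports prove the two sums EQUAL, so the final exact division agrees); the ports
-- therefore omit that dead branch.  Python raises ValueError for m <= 0: excluded by Pre_.

-- ===== PORT A =====
-- trial-division loop of _prime_factors: 'while d*d <= x' with the inner 'while x % d == 0'
-- folded into the same recursion; the '2 ≤ d' conjunct only makes the recursion total (the
-- wrapper always starts at d = 2).  All Python ints here are provably nonnegative, so the
-- arithmetic is carried on Nat ('//' and '%' on nonnegative ints coincide with Nat./ and Nat.%).
def pvPfLoop (d x : Nat) (f : PySem.Dict Nat Nat) : PySem.Dict Nat Nat × Nat :=
  if h : 2 ≤ d ∧ d * d ≤ x then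
    if x % d = 0 then pvPfLoop d (x / d) (f.insert d (f.getD d 0 + 1))
    else pvPfLoop (if d = 2 then 3 else d + 2) x f
  else (f, x)
termination_by 2 * x - d
decreasing_by
  · have hd : d ≤ d * d := Nat.le_mul_of_pos_left d (by omega)
    have hq : x / d < x := Nat.div_lt_self (by omega) (by omega)
    have : x / d ≥ 0 := Nat.zero_le _
    omega
  · have hd : d ≤ d * d := Nat.le_mul_of_pos_left d (by omega)
    split <;> omega

-- _prime_factors n (only reached with n ≥ 1 from _n_prim, so the ValueError guard is dead)
def pvPrimeFactorsA (n : Nat) : PySem.Dict Nat Nat :=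
  let r := pvPfLoop 2 n PySem.Dict.empty
  if 1 < r.2 then r.1.insert r.2 (r.1.getD r.2 0 + 1) else r.1

-- _mobius; the early-returning 'for e in fac.values(): if e >= 2: return 0' is List.any
def pvMobiusA (n : Nat) : Int :=
  if n = 1 then 1
  else
    let fac := pvPrimeFactorsA n
    if fac.values.any (fun e => 2 ≤ e) then 0
    else if fac.size % 2 = 1 then -1 else 1

-- _divisors collection loop ('d += 1'); the '2 ≤ d' conjunct only makes the recursion total
def pvDivLoop (d n : Nat) (s : PySem.Set Nat) : PySem.Set Nat :=
  if h : 2 ≤ d ∧ d * d ≤ n then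
    pvDivLoop (d + 1) n (if n % d = 0 then PySem.Set.add (PySem.Set.add s d) (n / d) else s)
  else s
termination_by n - d
decreasing_by
  have hd : d * 2 ≤ d * d := Nat.mul_le_mul_left d (by omega)
  omega

def pvDivisorsA (n : Nat) : List Nat :=
  if n < 1 then []
  else PySem.List.sorted (pvDivLoop 2 n (PySem.Set.ofList [1, n])) (fun x => x) false

def n_prim_py (m : Int) (a : Int) : Int :=
  if m ≤ 0 then 0            -- Python raises ValueError here; excluded by Pre_
  else if a < 0 ∨ m < a then 0
  else
    let mN := m.toNat
    let aN := a.toNat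
    let g := Nat.gcd mN aN
    let s := (pvDivisorsA g).foldl
      (fun s e => s + pvMobiusA e * ((Nat.choose (mN / e) (aN / e) : Nat) : Int)) 0
    PySem.Int.floordiv s m

-- ===== PORT B =====
-- inner 'while x % d == 0: x //= d' (the '2 ≤ d ∧ 1 ≤ x' conjuncts only make it total)
def pvStrip (d x : Nat) : Nat :=
  if h : 2 ≤ d ∧ 1 ≤ x ∧ x % d = 0 then pvStrip d (x / d) else x
termination_by x
decreasing_by exact Nat.div_lt_self (by omega) (by omega)

theorem pvStrip_le (d x : Nat) : pvStrip d x ≤ x := by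
  fun_induction pvStrip d x with
  | case1 x h ih => exact le_trans ih (Nat.div_le_self _ _)
  | case2 x h => exact le_refl x

-- outer 'while d*d <= x' loop of B collecting the distinct primes
def pvPrimesLoop (d x : Nat) (ps : List Nat) : List Nat × Nat :=
  if h : 2 ≤ d ∧ d * d ≤ x then
    if x % d = 0 then
      pvPrimesLoop (if d = 2 then 3 else d + 2) (pvStrip d x) (ps ++ [d])
    else
      pvPrimesLoop (if d = 2 then 3 else d + 2) x ps
  else (ps, x)
termination_by 2 * x - d
decreasing_by
  · have hs : pvStrip d x ≤ x := pvStrip_le d x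
    have hd : d ≤ d * d := Nat.le_mul_of_pos_left d (by omega)
    split <;> omega
  · have hd : d ≤ d * d := Nat.le_mul_of_pos_left d (by omega)
    split <;> omega

-- 'signed_sum(i, dd)': structural recursion on the suffix primes[i:]
def pvSignedSum (m a : Nat) : List Nat → Nat → Int
  | [], dd => ((Nat.choose (m / dd) (a / dd) : Nat) : Int)
  | p :: rest, dd => pvSignedSum m a rest dd - pvSignedSum m a rest (dd * p)

def n_prim_py_alt (m : Int) (a : Int) : Int :=
  if m ≤ 0 then 0            -- Python raises ValueError here; excluded by Pre_
  else if a < 0 ∨ m < a then 0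
  else
    let mN := m.toNat
    let aN := a.toNat
    let g := Nat.gcd mN aN
    let r := pvPrimesLoop 2 g []
    let ps := if 1 < r.2 then r.1 ++ [r.2] else r.1
    PySem.Int.floordiv (pvSignedSum mN aN ps 1) m

-- ===== PRECONDITION & SPEC =====
-- Pre_ excludes exactly m ≤ 0, where the Python raises ValueError("m must be >= 1").
def Pre_n_prim_py (m : Int) (a : Int) : Prop := 1 ≤ m
instance (m : Int) (a : Int) : Decidable (Pre_n_prim_py m a) := by unfold Pre_n_prim_py; infer_instance
def pvWitness_n_prim_py : Int × Int := (6, 2)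

def Spec_n_prim_py (m : Int) (a : Int) (out : Int) : Prop := out = n_prim_py_alt m a
instance (m : Int) (a : Int) (out : Int) : Decidable (Spec_n_prim_py m a out) := by unfold Spec_n_prim_py; infer_instance

-- ===== CLAIM (what is proved, stated in full; the proofs are below) =====
def Claim_equal_n_prim_py : Prop := ∀ (m : Int) (a : Int), Dom_n_prim_py m a → Pre_n_prim_py m a → Spec_n_prim_py m a (n_prim_py m a)

-- ===== LEMMAS AND PROOFS =====

-- ---- generic: Möbius of a product of distinct primes, and squarefreeness ----

theorem pv_squarefree_moebius_prod (S : Finset ℕ) (h : ∀ p ∈ S, p.Prime) :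
    Squarefree (S.prod id) ∧
      (ArithmeticFunction.moebius (S.prod id) : Int) = (-1) ^ S.card := by
  classical
  induction S using Finset.induction_on with
  | empty => simp
  | insert a s ha ih =>
    have hap : a.Prime := h a (Finset.mem_insert_self a s)
    have hs : ∀ p ∈ s, p.Prime := fun p hp => h p (Finset.mem_insert_of_mem hp)
    obtain ⟨ihsq, ihmu⟩ := ih hs
    have hnd : ¬ a ∣ s.prod id := by
      intro hdvd
      obtain ⟨p, hp, hap2⟩ := (Nat.Prime.prime hap).dvd_finset_prod_iff id |>.mp hdvd
      exact ha (((Nat.prime_dvd_prime_iff_eq hap (hs p hp)).mp hap2) ▸ hp)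
    have hcop : a.Coprime (s.prod id) := (Nat.Prime.coprime_iff_not_dvd hap).mpr hnd
    rw [Finset.prod_insert ha, Finset.card_insert_of_notMem ha]
    constructor
    · exact (Nat.squarefree_mul hcop).mpr ⟨hap.squarefree, ihsq⟩
    · have := ArithmeticFunction.isMultiplicative_moebius.map_mul_of_coprime (f := _) hcop
      simp only [id] at this ⊢
      rw [this, ArithmeticFunction.moebius_apply_prime hap]
      have ihmu' : ArithmeticFunction.moebius (∏ x ∈ s, x) = (-1) ^ s.card := by
        simpa [id] using ihmu
      rw [ihmu', pow_succ]
      ring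

-- inclusion-exclusion recursion = signed sum over the powerset of the prime list
theorem pvSignedSum_powerset (m a : Nat) (ps : List Nat) (h : ps.Nodup) (dd : Nat) :
    pvSignedSum m a ps dd =
      ∑ S ∈ ps.toFinset.powerset,
        (-1 : Int) ^ S.card *
          ((Nat.choose (m / (dd * S.prod id)) (a / (dd * S.prod id)) : Nat) : Int) := by
  induction ps generalizing dd with
  | nil => simp [pvSignedSum]
  | cons p rest ih =>
    have hp : p ∉ rest := (List.nodup_cons.mp h).1
    have hr : rest.Nodup := (List.nodup_cons.mp h).2
    have hpF : p ∉ rest.toFinset := by simpa using hp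
    rw [pvSignedSum, List.toFinset_cons, Finset.sum_powerset_insert hpF, ih hr dd, ih hr (dd * p)]
    have hterm : ∀ S ∈ rest.toFinset.powerset,
        (-1 : Int) ^ (insert p S).card *
            ((Nat.choose (m / (dd * (insert p S).prod id)) (a / (dd * (insert p S).prod id)) : Nat) : Int)
          = -((-1 : Int) ^ S.card *
            ((Nat.choose (m / (dd * p * S.prod id)) (a / (dd * p * S.prod id)) : Nat) : Int)) := by
      intro S hS
      have hpS : p ∉ S := fun hmem => hpF (Finset.mem_powerset.mp hS hmem)
      rw [Finset.card_insert_of_notMem hpS, Finset.prod_insert hpS]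
      have : dd * (id p * S.prod id) = dd * p * S.prod id := by simp [id]; ring
      rw [this, pow_succ]
      ring
    rw [Finset.sum_congr rfl hterm, Finset.sum_neg_distrib]
    ring

-- ---- the bridge: Möbius divisor sum = signed sum over subsets of the prime factors ----

theorem pv_moebius_sum_eq_powerset (g : Nat) (hg : 1 ≤ g) (F : Nat → Int) :
    (∑ e ∈ g.divisors, (ArithmeticFunction.moebius e : Int) * F e)
      = ∑ S ∈ g.primeFactors.powerset, (-1 : Int) ^ S.card * F (S.prod id) := by
  classical
  have hg0 : g ≠ 0 := by omega
  have h1 : (∑ e ∈ g.divisors with Squarefree e, (ArithmeticFunction.moebius e : Int) * F e)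
      = ∑ e ∈ g.divisors, (ArithmeticFunction.moebius e : Int) * F e := by
    apply Finset.sum_filter_of_ne
    intro e _ hne
    by_contra hsq
    exact hne (by rw [ArithmeticFunction.moebius_eq_zero_of_not_squarefree hsq]; ring)
  rw [← h1]
  refine Finset.sum_nbij' (fun e => e.primeFactors) (fun S => S.prod id) ?_ ?_ ?_ ?_ ?_
  · intro e he
    rw [Finset.mem_filter, Nat.mem_divisors] at he
    exact Finset.mem_powerset.mpr (Nat.primeFactors_mono he.1.1 hg0)
  · intro S hS
    have hprime : ∀ p ∈ S, p.Prime := fun p hp =>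
      Nat.prime_of_mem_primeFactors (Finset.mem_powerset.mp hS hp)
    obtain ⟨hsq, _⟩ := pv_squarefree_moebius_prod S hprime
    rw [Finset.mem_filter, Nat.mem_divisors]
    refine ⟨⟨?_, hg0⟩, hsq⟩
    calc S.prod id ∣ g.primeFactors.prod id :=
          Finset.prod_dvd_prod_of_subset _ _ _ (Finset.mem_powerset.mp hS)
      _ ∣ g := by simpa [id] using Nat.prod_primeFactors_dvd g
  · intro e he
    rw [Finset.mem_filter] at he
    simpa [id] using Nat.prod_primeFactors_of_squarefree he.2
  · intro S hS
    have hprime : ∀ p ∈ S, p.Prime := fun p hp =>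
      Nat.prime_of_mem_primeFactors (Finset.mem_powerset.mp hS hp)
    simpa [id] using Nat.primeFactors_prod hprime
  · intro e he
    rw [Finset.mem_filter] at he
    have hsq := he.2
    have hprime : ∀ p ∈ e.primeFactors, p.Prime := fun p hp => Nat.prime_of_mem_primeFactors hp
    obtain ⟨_, hmu⟩ := pv_squarefree_moebius_prod e.primeFactors hprime
    have hpe : e.primeFactors.prod id = e := by simpa [id] using Nat.prod_primeFactors_of_squarefree hsq
    rw [hpe] at hmu ⊢
    rw [hmu]


-- ---- A-side: the collected set of _divisors is exactly the divisors of n ----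

theorem pvDivLoop_mem (d n : Nat) (s : PySem.Set Nat) (k : Nat) : 2 ≤ d →
    (k ∈ pvDivLoop d n s ↔
      k ∈ s ∨ ∃ j, d ≤ j ∧ j * j ≤ n ∧ n % j = 0 ∧ (k = j ∨ k = n / j)) := by
  fun_induction pvDivLoop d n s with
  | case1 d s h ih =>
    intro _
    have ih' := ih (by omega)
    rw [dite_eq_ite] at ih'
    rw [ih']
    by_cases hmod : n % d = 0
    · rw [if_pos hmod]
      simp only [PySem.Set.mem_add]
      constructor
      · rintro ((( hk | hk ) | hk) | ⟨j, hj1, hj2, hj3, hj4⟩)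
        · exact Or.inl hk
        · exact Or.inr ⟨d, le_refl d, h.2, hmod, Or.inl hk⟩
        · exact Or.inr ⟨d, le_refl d, h.2, hmod, Or.inr hk⟩
        · exact Or.inr ⟨j, by omega, hj2, hj3, hj4⟩
      · rintro (hk | ⟨j, hj1, hj2, hj3, hj4⟩)
        · exact Or.inl (Or.inl (Or.inl hk))
        · rcases Nat.eq_or_lt_of_le hj1 with rfl | hlt
          · rcases hj4 with rfl | rfl
            · exact Or.inl (Or.inl (Or.inr rfl))
            · exact Or.inl (Or.inr rfl)
          · exact Or.inr ⟨j, by omega, hj2, hj3, hj4⟩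
    · rw [if_neg hmod]
      constructor
      · rintro (hk | ⟨j, hj1, hj2, hj3, hj4⟩)
        · exact Or.inl hk
        · exact Or.inr ⟨j, by omega, hj2, hj3, hj4⟩
      · rintro (hk | ⟨j, hj1, hj2, hj3, hj4⟩)
        · exact Or.inl hk
        · rcases Nat.eq_or_lt_of_le hj1 with rfl | hlt
          · exact absurd hj3 hmod
          · exact Or.inr ⟨j, by omega, hj2, hj3, hj4⟩
  | case2 d s h =>
    intro hd
    have hout : ∀ j, d ≤ j → ¬ (j * j ≤ n) := by
      intro j hj hle
      exact h ⟨hd, le_trans (Nat.mul_le_mul hj hj) hle⟩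
    constructor
    · exact Or.inl
    · rintro (hk | ⟨j, hj1, hj2, _⟩)
      · exact hk
      · exact absurd hj2 (hout j hj1)

theorem pvDivLoop_nodup (d n : Nat) (s : PySem.Set Nat) (h : s.Nodup) :
    (pvDivLoop d n s).Nodup := by
  fun_induction pvDivLoop d n s with
  | case1 d s hc ih =>
    apply ih
    split
    · exact PySem.Set.nodup_add _ _ (PySem.Set.nodup_add _ _ h)
    · exact h
  | case2 d s hc => exact h

theorem pvDivisorsA_mem (g : Nat) (hg : 1 ≤ g) (k : Nat) : k ∈ pvDivisorsA g ↔ k ∣ g := by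
  unfold pvDivisorsA
  rw [if_neg (by omega)]
  rw [PySem.List.mem_sorted]
  rw [pvDivLoop_mem 2 g _ k (le_refl 2), PySem.Set.mem_ofList]
  simp only [List.mem_cons, List.not_mem_nil, or_false]
  constructor
  · rintro ((h1 | h1) | ⟨j, hj1, hj2, hj3, hj4⟩)
    · rw [h1]; exact one_dvd g
    · rw [h1]
    · have hjd : j ∣ g := Nat.dvd_of_mod_eq_zero hj3
      rcases hj4 with rfl | rfl
      · exact hjd
      · exact Nat.div_dvd_of_dvd hjd
  · intro hk
    by_cases h1 : k = 1
    · exact Or.inl (Or.inl h1)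
    by_cases hgk : k = g
    · exact Or.inl (Or.inr hgk)
    right
    obtain ⟨c, hc⟩ := hk
    have hk0 : k ≠ 0 := by rintro rfl; simp at hc; omega
    have hc0 : c ≠ 0 := by rintro rfl; simp at hc; omega
    have hc1 : c ≠ 1 := by rintro rfl; rw [mul_one] at hc; exact hgk hc.symm
    have hk2 : 2 ≤ k := by
      rcases Nat.lt_or_ge k 2 with h | h
      · interval_cases k <;> simp_all
      · exact h
    have hc2 : 2 ≤ c := by omega
    by_cases hsq : k * k ≤ g
    · exact ⟨k, hk2, hsq, Nat.mod_eq_zero_of_dvd ⟨c, hc⟩, Or.inl rfl⟩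
    · refine ⟨c, hc2, ?_, Nat.mod_eq_zero_of_dvd ⟨k, by rw [hc, Nat.mul_comm]⟩, Or.inr ?_⟩
      · have hck : c < k := by nlinarith
        nlinarith
      · rw [hc, Nat.mul_div_cancel _ (by omega)]

theorem pvDivisorsA_nodup (g : Nat) : (pvDivisorsA g).Nodup := by
  unfold pvDivisorsA
  split
  · exact List.nodup_nil
  · exact (PySem.List.sorted_perm _ _ _).nodup_iff.mpr
      (pvDivLoop_nodup 2 g _ (PySem.Set.nodup_ofList _))

-- ---- A-side factor-loop invariant ----

theorem pv_prime_of_min_factor (d x : Nat) (hd : 2 ≤ d) (hx : 1 < x) (hlt : x < d * d)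
    (hmin : ∀ q, q.Prime → q ∣ x → d ≤ q) : x.Prime := by
  have hq : x.minFac.Prime := Nat.minFac_prime (by omega)
  have hqd : d ≤ x.minFac := hmin _ hq (Nat.minFac_dvd x)
  have hqx : x.minFac ∣ x := Nat.minFac_dvd x
  have hr1 : x / x.minFac = 1 := by
    by_contra hne
    have hrpos : 1 ≤ x / x.minFac :=
      (Nat.one_le_div_iff (Nat.minFac_pos x)).mpr (Nat.le_of_dvd (by omega) hqx)
    have hr : 1 < x / x.minFac := by omega
    have hp : (x / x.minFac).minFac.Prime := Nat.minFac_prime (by omega)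
    have hpd : d ≤ (x / x.minFac).minFac :=
      hmin _ hp (dvd_trans (Nat.minFac_dvd _) (Nat.div_dvd_of_dvd hqx))
    have hple : (x / x.minFac).minFac ≤ x / x.minFac :=
      Nat.minFac_le (by omega)
    have hxd : x / x.minFac ≤ x / d := Nat.div_le_div_left hqd (by omega)
    have : x / d < d := Nat.div_lt_of_lt_mul hlt
    omega
  have : x = x.minFac := by
    have := Nat.div_mul_cancel hqx
    rw [hr1, one_mul] at this
    omega
  rw [this]
  exact hq

-- d divides x and every prime factor of x is ≥ d, so d is prime

theorem pv_trial_divisor_prime (d x : Nat) (hd : 2 ≤ d) (hx : 1 ≤ x) (hdvd : d ∣ x)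
    (hmin : ∀ q, q.Prime → q ∣ x → d ≤ q) : d.Prime := by
  obtain ⟨q, hq, hqd⟩ := Nat.exists_prime_and_dvd (n := d) (by omega)
  have hqle : q ≤ d := Nat.le_of_dvd (by omega) hqd
  have hge : d ≤ q := hmin q hq (dvd_trans hqd hdvd)
  have : q = d := by omega
  rwa [← this]

-- the next trial divisor still lower-bounds the prime factors

theorem pv_next_min (d x : Nat) (hd : 2 ≤ d) (hodd : d = 2 ∨ d % 2 = 1)
    (hnd : ¬ d ∣ x) (hmin : ∀ q, q.Prime → q ∣ x → d ≤ q) :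
    ∀ q, q.Prime → q ∣ x → (if d = 2 then 3 else d + 2) ≤ q := by
  intro q hq hqx
  have h1 : d ≤ q := hmin q hq hqx
  have h2 : q ≠ d := by rintro rfl; exact hnd hqx
  split
  · omega
  · rcases hodd with rfl | hodd
    · omega
    have h3 : q ≠ d + 1 := by
      rintro rfl
      have heven : 2 ∣ d + 1 := by omega
      have := (Nat.Prime.eq_one_or_self_of_dvd hq 2 heven)
      omega
    omega



-- a dict whose keys are strictly increasing and ≤ p decomposes with any entry keyed p last
theorem pv_last_decomp (l : List (Nat × Nat)) (p e : Nat)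
    (hpair : (l.map Prod.fst).Pairwise (· < ·))
    (hle : ∀ pe ∈ l, pe.1 ≤ p) (hmem : (p, e) ∈ l) :
    ∃ l', l = l' ++ [(p, e)] ∧ ∀ pe ∈ l', pe.1 < p := by
  induction l with
  | nil => cases hmem
  | cons a t ih =>
    rw [List.map_cons, List.pairwise_cons] at hpair
    rcases List.mem_cons.mp hmem with rfl | hmt
    · have ht : t = [] := by
        by_contra hne
        obtain ⟨b, hb⟩ := List.exists_mem_of_ne_nil t hne
        have h1 : (p, e).1 < b.1 := hpair.1 b.1 (List.mem_map_of_mem hb)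
        have h2 : b.1 ≤ p := hle b (List.mem_cons_of_mem _ hb)
        simp at h1; omega
      exact ⟨[], by rw [ht]; rfl, by simp⟩
    · obtain ⟨l', hl', hlt⟩ := ih hpair.2 (fun pe hpe => hle pe (List.mem_cons_of_mem _ hpe)) hmt
      refine ⟨a :: l', by rw [hl']; rfl, ?_⟩
      intro pe hpe
      rcases List.mem_cons.mp hpe with rfl | hpe'
      · have : pe.1 < p := by
          have := hpair.1 p (by rw [hl']; simp)
          exact this
        exact this
      · exact hlt pe hpe'

-- effect of  f[p] = f.get(p, 0) + 1  on a dict with increasing keys all ≤ p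
theorem pv_bump (f : PySem.Dict Nat Nat) (p : Nat)
    (hpair : (f.items.map Prod.fst).Pairwise (· < ·))
    (hle : ∀ pe ∈ f.items, pe.1 ≤ p) :
    (((f.insert p (f.getD p 0 + 1)).items.map Prod.fst).Pairwise (· < ·)) ∧
    (∀ pe ∈ (f.insert p (f.getD p 0 + 1)).items,
        (pe ∈ f.items ∧ pe.1 ≠ p) ∨ (pe.1 = p ∧ 1 ≤ pe.2)) ∧
    ((f.insert p (f.getD p 0 + 1)).items.map fun pe => pe.1 ^ pe.2).prod
      = (f.items.map fun pe => pe.1 ^ pe.2).prod * p := by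
  have hnodup : (f.items.map Prod.fst).Nodup := hpair.imp (fun hab => Nat.ne_of_lt hab)
  by_cases hc : f.contains p = true
  · have hpk : p ∈ f.items.map Prod.fst := (PySem.Dict.contains_iff_mem_keys f p).mp hc
    obtain ⟨pe0, hpe0, hfst⟩ := List.mem_map.mp hpk
    have hpe0' : (p, pe0.2) ∈ f.items := by
      have : pe0 = (p, pe0.2) := by cases pe0; simp at hfst ⊢; omega
      rwa [this] at hpe0
    obtain ⟨l', hl', hlt⟩ := pv_last_decomp f.items p pe0.2 hpair hle hpe0'
    have hget : f.getD p 0 = pe0.2 := PySem.Dict.getD_of_mem_items f (by rw [hl']; simp) hnodup 0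
    have hitems : (f.insert p (f.getD p 0 + 1)).items = l' ++ [(p, pe0.2 + 1)] := by
      rw [PySem.Dict.items_insert_of_contains _ _ hc, hget, hl', List.map_append]
      congr 1
      · conv_rhs => rw [← List.map_id l']
        apply List.map_congr_left
        intro q hq
        have hqp : q.1 ≠ p := Nat.ne_of_lt (hlt q hq)
        simp [hqp]
      · simp
    refine ⟨?_, ?_, ?_⟩
    · have hkeys : ((l' ++ [(p, pe0.2 + 1)]).map Prod.fst) = (f.items.map Prod.fst) := by
        rw [hl']; simp
      rw [hitems, hkeys]
      exact hpair
    · intro pe hpe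
      rw [hitems, List.mem_append, List.mem_singleton] at hpe
      rcases hpe with hpe | rfl
      · exact Or.inl ⟨by rw [hl']; exact List.mem_append_left _ hpe,
          Nat.ne_of_lt (hlt pe hpe)⟩
      · exact Or.inr ⟨rfl, by omega⟩
    · rw [hitems, hl']
      simp only [List.map_append, List.prod_append, List.map_cons, List.map_nil,
        List.prod_cons, List.prod_nil]
      rw [pow_succ]
      ring
  · have hc' : f.contains p = false := by simpa using hc
    have hget : f.getD p 0 = 0 := PySem.Dict.getD_of_not_contains _ _ hc'
    have hitems : (f.insert p (f.getD p 0 + 1)).items = f.items ++ [(p, 0 + 1)] := by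
      rw [hget, PySem.Dict.items_insert_of_not_contains _ _ hc']
    have hnp : ∀ pe ∈ f.items, pe.1 ≠ p := by
      intro pe hpe heq
      have h0 : p ∈ f.items.map Prod.fst := heq ▸ List.mem_map_of_mem hpe
      have h1 : p ∈ f.keys := h0
      have h2 := (PySem.Dict.contains_iff_mem_keys f p).mpr h1
      rw [hc'] at h2
      cases h2
    refine ⟨?_, ?_, ?_⟩
    · rw [hitems, List.map_append, List.pairwise_append]
      refine ⟨hpair, by simp, ?_⟩
      intro a ha b hb
      simp only [List.map_cons, List.map_nil, List.mem_singleton] at hb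
      subst hb
      obtain ⟨pe, hpe, rfl⟩ := List.mem_map.mp ha
      exact Nat.lt_of_le_of_ne (hle pe hpe) (hnp pe hpe)
    · intro pe hpe
      rw [hitems, List.mem_append, List.mem_singleton] at hpe
      rcases hpe with hpe | rfl
      · exact Or.inl ⟨hpe, hnp pe hpe⟩
      · exact Or.inr ⟨rfl, by omega⟩
    · rw [hitems]
      simp

theorem pvPfLoop_inv (n : Nat) (d x : Nat) (f : PySem.Dict Nat Nat) :
    2 ≤ d → (d = 2 ∨ d % 2 = 1) → 1 ≤ x →
    (∀ q, q.Prime → q ∣ x → d ≤ q) →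
    ((f.items.map Prod.fst).Pairwise (· < ·)) →
    (∀ pe ∈ f.items, pe.1.Prime ∧ 1 ≤ pe.2 ∧ pe.1 ≤ d) →
    n = x * (f.items.map fun pe => pe.1 ^ pe.2).prod →
    1 ≤ (pvPfLoop d x f).2 ∧
    (((pvPfLoop d x f).1.items.map Prod.fst).Pairwise (· < ·)) ∧
    (∀ pe ∈ (pvPfLoop d x f).1.items, pe.1.Prime ∧ 1 ≤ pe.2) ∧
    n = (pvPfLoop d x f).2 * ((pvPfLoop d x f).1.items.map fun pe => pe.1 ^ pe.2).prod ∧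
    (1 < (pvPfLoop d x f).2 →
      (pvPfLoop d x f).2.Prime ∧ ∀ pe ∈ (pvPfLoop d x f).1.items, pe.1 ≤ (pvPfLoop d x f).2) := by
  fun_induction pvPfLoop d x f with
  | case1 d x f h hmod ih =>
    intro hd hodd hx hmin hpair hmem hn
    have hdvd : d ∣ x := Nat.dvd_of_mod_eq_zero hmod
    have hdp : d.Prime := pv_trial_divisor_prime d x hd hx hdvd hmin
    obtain ⟨hbp, hbm, hbprod⟩ := pv_bump f d hpair (fun pe hpe => (hmem pe hpe).2.2)
    apply ih hd hodd
    · exact (Nat.one_le_div_iff (by omega)).mpr (Nat.le_of_dvd (by omega) hdvd)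
    · intro q hq hqx
      exact hmin q hq (dvd_trans hqx (Nat.div_dvd_of_dvd hdvd))
    · exact hbp
    · intro pe hpe
      rcases hbm pe hpe with ⟨hpe', _⟩ | ⟨hfst, hexp⟩
      · exact hmem pe hpe'
      · exact ⟨hfst ▸ hdp, hexp, by omega⟩
    · rw [hn, hbprod]
      generalize (List.map (fun pe => pe.1 ^ pe.2) f.items).prod = P
      have hxd : x / d * d = x := Nat.div_mul_cancel hdvd
      calc x * P = x / d * d * P := by rw [hxd]
        _ = x / d * (P * d) := by ring
  | case2 d x f h hmod ih =>
    intro hd hodd hx hmin hpair hmem hn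
    have hndvd : ¬ d ∣ x := fun hdvd => hmod (Nat.mod_eq_zero_of_dvd hdvd)
    apply ih
    · split <;> omega
    · right; split <;> omega
    · exact hx
    · exact pv_next_min d x hd hodd hndvd hmin
    · exact hpair
    · intro pe hpe
      obtain ⟨h1, h2, h3⟩ := hmem pe hpe
      exact ⟨h1, h2, by split <;> omega⟩
    · exact hn
  | case3 d x f h =>
    intro hd hodd hx hmin hpair hmem hn
    have hlt : x < d * d := by
      by_contra hle
      exact h ⟨hd, by omega⟩
    refine ⟨hx, hpair, fun pe hpe => ⟨(hmem pe hpe).1, (hmem pe hpe).2.1⟩, hn, ?_⟩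
    intro hx1
    refine ⟨pv_prime_of_min_factor d x hd hx1 hlt hmin, ?_⟩
    intro pe hpe
    have hdx : d ≤ x := le_trans (hmin _ (Nat.minFac_prime (by omega)) (Nat.minFac_dvd x))
      (Nat.minFac_le (by omega))
    have := (hmem pe hpe).2.2
    omega

-- the dict produced by _prime_factors: strictly increasing prime keys, positive
-- exponents, and the prime powers multiply back to n
theorem pvPrimeFactorsA_final (n : Nat) (hn : 1 ≤ n) :
    (((pvPrimeFactorsA n).items.map Prod.fst).Pairwise (· < ·)) ∧
    (∀ pe ∈ (pvPrimeFactorsA n).items, pe.1.Prime ∧ 1 ≤ pe.2) ∧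
    n = ((pvPrimeFactorsA n).items.map fun pe => pe.1 ^ pe.2).prod := by
  obtain ⟨h1, h2, h3, h4, h5⟩ := pvPfLoop_inv n 2 n PySem.Dict.empty
    (le_refl 2) (Or.inl rfl) hn (fun q hq _ => hq.two_le)
    (by simp [show (PySem.Dict.empty : PySem.Dict Nat Nat).items = [] from rfl])
    (by simp [show (PySem.Dict.empty : PySem.Dict Nat Nat).items = [] from rfl])
    (by simp [show (PySem.Dict.empty : PySem.Dict Nat Nat).items = [] from rfl])
  unfold pvPrimeFactorsA
  by_cases hx : 1 < (pvPfLoop 2 n PySem.Dict.empty).2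
  · rw [if_pos hx]
    obtain ⟨hxp, hxle⟩ := h5 hx
    obtain ⟨hbp, hbm, hbprod⟩ := pv_bump (pvPfLoop 2 n PySem.Dict.empty).1
      (pvPfLoop 2 n PySem.Dict.empty).2 h2 hxle
    refine ⟨hbp, ?_, ?_⟩
    · intro pe hpe
      rcases hbm pe hpe with ⟨hpe', _⟩ | ⟨hfst, hexp⟩
      · exact h3 pe hpe'
      · exact ⟨hfst ▸ hxp, hexp⟩
    · rw [hbprod]
      conv_lhs => rw [h4]
      exact Nat.mul_comm _ _
  · rw [if_neg hx]
    have hone : (pvPfLoop 2 n PySem.Dict.empty).2 = 1 := by omega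
    exact ⟨h2, h3, h4.trans (by rw [hone, Nat.one_mul])⟩

-- the product of the dict's prime powers: its prime factors and squarefreeness
theorem pv_prodPE_facts (l : List (Nat × Nat))
    (hpair : (l.map Prod.fst).Pairwise (· < ·))
    (hpe : ∀ pe ∈ l, pe.1.Prime ∧ 1 ≤ pe.2) :
    0 < (l.map fun pe => pe.1 ^ pe.2).prod ∧
    ((l.map fun pe : Nat × Nat => pe.1 ^ pe.2).prod).primeFactors = (l.map Prod.fst).toFinset ∧
    (Squarefree ((l.map fun pe : Nat × Nat => pe.1 ^ pe.2).prod) ↔ ∀ pe ∈ l, pe.2 ≤ 1) := by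
  induction l with
  | nil => simp
  | cons a t ih =>
    rw [List.map_cons, List.pairwise_cons] at hpair
    have hap : a.1.Prime := (hpe a (List.mem_cons_self)).1
    have hae : 1 ≤ a.2 := (hpe a (List.mem_cons_self)).2
    obtain ⟨ihpos, ihpf, ihsq⟩ := ih hpair.2 (fun pe hp => hpe pe (List.mem_cons_of_mem _ hp))
    have hppos : 0 < a.1 ^ a.2 := pow_pos hap.pos _
    have hnd : ¬ a.1 ∣ (t.map fun pe : Nat × Nat => pe.1 ^ pe.2).prod := by
      intro hdvd
      have : a.1 ∈ ((t.map fun pe : Nat × Nat => pe.1 ^ pe.2).prod).primeFactors :=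
        Nat.mem_primeFactors.mpr ⟨hap, hdvd, by omega⟩
      rw [ihpf, List.mem_toFinset] at this
      exact absurd (hpair.1 a.1 this) (by omega)
    have hcop : (a.1 ^ a.2).Coprime ((t.map fun pe : Nat × Nat => pe.1 ^ pe.2).prod) :=
      Nat.Coprime.pow_left _ ((Nat.Prime.coprime_iff_not_dvd hap).mpr hnd)
    refine ⟨?_, ?_, ?_⟩
    · simp only [List.map_cons, List.prod_cons]
      exact Nat.mul_pos hppos ihpos
    · simp only [List.map_cons, List.prod_cons]
      rw [Nat.primeFactors_mul (by omega) (by omega),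
        Nat.primeFactors_prime_pow (k := a.2) (by omega) hap, ihpf]
      simp [List.toFinset_cons]
    · simp only [List.map_cons, List.prod_cons]
      rw [Nat.squarefree_mul hcop]
      have hsqp : Squarefree (a.1 ^ a.2) ↔ a.2 ≤ 1 := by
        constructor
        · intro hsq
          by_contra hgt
          have hdd : a.1 * a.1 ∣ a.1 ^ a.2 := by
            have : a.1 ^ 2 ∣ a.1 ^ a.2 := Nat.pow_dvd_pow _ (by omega)
            rwa [pow_two] at this
          have := hsq a.1 hdd
          rw [Nat.isUnit_iff] at this
          exact absurd this hap.ne_one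
        · intro hle
          have : a.2 = 1 := by omega
          rw [this, pow_one]
          exact hap.prime.squarefree
      rw [hsqp, ihsq, List.forall_mem_cons]

-- the Möbius routine of A computes Mathlib's Möbius function (proved via the
-- factor-loop invariant further below)
theorem pvMobiusA_eq (n : Nat) (hn : 1 ≤ n) :
    pvMobiusA n = ArithmeticFunction.moebius n := by
  by_cases h1 : n = 1
  · subst h1
    rw [ArithmeticFunction.moebius_apply_one]
    rfl
  · unfold pvMobiusA
    rw [if_neg h1]
    obtain ⟨hpair, hpe, hprod⟩ := pvPrimeFactorsA_final n hn
    obtain ⟨hpos, hpf, hsq⟩ := pv_prodPE_facts (pvPrimeFactorsA n).items hpair hpe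
    rw [← hprod] at hpf hsq
    have hv : (pvPrimeFactorsA n).values = (pvPrimeFactorsA n).items.map Prod.snd := rfl
    have hsize : (pvPrimeFactorsA n).size = (pvPrimeFactorsA n).items.length := rfl
    by_cases hany : (pvPrimeFactorsA n).values.any (fun e => 2 ≤ e)
    · rw [if_pos hany]
      have hnsq : ¬ Squarefree n := by
        rw [hsq]
        push Not
        rw [hv] at hany
        obtain ⟨e, he, hge⟩ := List.any_eq_true.mp hany
        obtain ⟨pe, hpe', rfl⟩ := List.mem_map.mp he
        exact ⟨pe, hpe', by simpa using hge⟩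
      rw [ArithmeticFunction.moebius_eq_zero_of_not_squarefree hnsq]
    · rw [if_neg hany]
      have hsqn : Squarefree n := by
        rw [hsq]
        intro pe hpe'
        by_contra hgt
        apply hany
        rw [hv]
        exact List.any_eq_true.mpr ⟨pe.2, List.mem_map_of_mem hpe', by simpa using by omega⟩
      have hcard : n.primeFactors.card = (pvPrimeFactorsA n).items.length := by
        rw [hpf, List.toFinset_card_of_nodup (hpair.imp (fun h => Nat.ne_of_lt h)),
          List.length_map]
      have hprime : ∀ p ∈ n.primeFactors, p.Prime :=
        fun p hp => Nat.prime_of_mem_primeFactors hp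
      obtain ⟨-, hmu⟩ := pv_squarefree_moebius_prod n.primeFactors hprime
      have hpn : n.primeFactors.prod id = n := by
        simpa [id] using Nat.prod_primeFactors_of_squarefree hsqn
      rw [hpn] at hmu
      rw [hmu, hcard, hsize]
      rcases Nat.even_or_odd ((pvPrimeFactorsA n).items.length) with hev | hod
      · rw [if_neg (by rw [Nat.even_iff] at hev; omega), Even.neg_one_pow hev]
      · rw [if_pos (by rw [Nat.odd_iff] at hod; omega), Odd.neg_one_pow hod]

theorem pvA_sum (mN aN g : Nat) (hg : 1 ≤ g) :
    ((pvDivisorsA g).foldl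
      (fun s e => s + pvMobiusA e * ((Nat.choose (mN / e) (aN / e) : Nat) : Int)) 0)
      = ∑ e ∈ g.divisors,
          (ArithmeticFunction.moebius e : Int) * ((Nat.choose (mN / e) (aN / e) : Nat) : Int) := by
  rw [PySem.List.foldl_add]
  have hnd := pvDivisorsA_nodup g
  have hfs : (pvDivisorsA g).toFinset = g.divisors := by
    ext k
    rw [List.mem_toFinset, pvDivisorsA_mem g hg k, Nat.mem_divisors]
    exact ⟨fun h => ⟨h, by omega⟩, fun h => h.1⟩
  rw [← List.sum_toFinset _ hnd, hfs, zero_add]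
  apply Finset.sum_congr rfl
  intro e he
  rw [Nat.mem_divisors] at he
  have he1 : 1 ≤ e := Nat.pos_of_dvd_of_pos he.1 (by omega)
  rw [pvMobiusA_eq e he1]

-- ---- B-side loop invariant: pvStrip facts ----

theorem pvStrip_pos (d x : Nat) : 1 ≤ x → 1 ≤ pvStrip d x := by
  fun_induction pvStrip d x with
  | case1 x h ih =>
    intro _
    have hdvd : d ∣ x := Nat.dvd_of_mod_eq_zero h.2.2
    exact ih ((Nat.one_le_div_iff (by omega)).mpr (Nat.le_of_dvd (by omega) hdvd))
  | case2 x h => exact id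

theorem pvStrip_dvd (d x : Nat) : pvStrip d x ∣ x := by
  fun_induction pvStrip d x with
  | case1 x h ih => exact dvd_trans ih (Nat.div_dvd_of_dvd (Nat.dvd_of_mod_eq_zero h.2.2))
  | case2 x h => exact dvd_refl x

theorem pvStrip_not_dvd (d x : Nat) : 2 ≤ d → 1 ≤ x → ¬ d ∣ pvStrip d x := by
  fun_induction pvStrip d x with
  | case1 x h ih =>
    intro hd _
    have hdvd : d ∣ x := Nat.dvd_of_mod_eq_zero h.2.2
    exact ih hd ((Nat.one_le_div_iff (by omega)).mpr (Nat.le_of_dvd (by omega) hdvd))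
  | case2 x h =>
    intro hd hx hdvd
    exact h ⟨hd, hx, Nat.mod_eq_zero_of_dvd hdvd⟩

theorem pvStrip_prime_dvd (d x q : Nat) (hd : d.Prime) (hq : q.Prime) (hne : q ≠ d) :
    q ∣ x → q ∣ pvStrip d x := by
  fun_induction pvStrip d x with
  | case1 x h ih =>
    intro hqx
    apply ih
    have hx' : q ∣ d * (x / d) := by
      rw [Nat.mul_div_cancel' (Nat.dvd_of_mod_eq_zero h.2.2)]; exact hqx
    rcases (Nat.Prime.dvd_mul hq).mp hx' with h1 | h1
    · exact absurd ((Nat.prime_dvd_prime_iff_eq hq hd).mp h1) hne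
    · exact h1
  | case2 x h => exact id

theorem pvStrip_prime_dvd_iff (d x q : Nat) (hd : d.Prime) (hq : q.Prime)
    (hx : 1 ≤ x) (hdvd : d ∣ x) : q ∣ x ↔ q = d ∨ q ∣ pvStrip d x := by
  constructor
  · intro hqx
    by_cases hne : q = d
    · exact Or.inl hne
    · exact Or.inr (pvStrip_prime_dvd d x q hd hq hne hqx)
  · rintro (rfl | h)
    · exact hdvd
    · exact dvd_trans h (pvStrip_dvd d x)

-- a number all of whose prime factors are ≥ its "current trial divisor" is prime
theorem pvPrimesLoop_inv (g : Nat) (d x : Nat) (ps : List Nat) :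
    2 ≤ d → (d = 2 ∨ d % 2 = 1) → 1 ≤ x →
    (∀ q, q.Prime → q ∣ x → d ≤ q) →
    ps.Pairwise (· < ·) →
    (∀ p ∈ ps, p.Prime ∧ p < d) →
    g.primeFactors = ps.toFinset ∪ x.primeFactors →
    1 ≤ (pvPrimesLoop d x ps).2 ∧
    (pvPrimesLoop d x ps).1.Pairwise (· < ·) ∧
    (∀ p ∈ (pvPrimesLoop d x ps).1, p.Prime) ∧
    (1 < (pvPrimesLoop d x ps).2 →
      (pvPrimesLoop d x ps).2.Prime ∧ ∀ p ∈ (pvPrimesLoop d x ps).1, p < (pvPrimesLoop d x ps).2) ∧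
    g.primeFactors = (pvPrimesLoop d x ps).1.toFinset ∪ (pvPrimesLoop d x ps).2.primeFactors := by
  fun_induction pvPrimesLoop d x ps with
  | case1 d x ps h hmod ih =>
    intro hd hodd hx hmin hpair hmem hpf
    have hdvd : d ∣ x := Nat.dvd_of_mod_eq_zero hmod
    have hdp : d.Prime := pv_trial_divisor_prime d x hd hx hdvd hmin
    have hx' : 1 ≤ pvStrip d x := pvStrip_pos d x hx
    have hndvd : ¬ d ∣ pvStrip d x := pvStrip_not_dvd d x hd hx
    apply ih
    · split <;> omega
    · right; split <;> omega
    · exact hx'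
    · intro q hq hqx
      have h1 : d ≤ q := hmin q hq (dvd_trans hqx (pvStrip_dvd d x))
      have h2 : q ≠ d := by rintro rfl; exact hndvd hqx
      split
      · omega
      · rcases hodd with rfl | hodd
        · omega
        have h3 : q ≠ d + 1 := by
          rintro rfl
          have heven : 2 ∣ d + 1 := by omega
          have := (Nat.Prime.eq_one_or_self_of_dvd hq 2 heven)
          omega
        omega
    · rw [List.pairwise_append]
      exact ⟨hpair, List.pairwise_singleton _ _, by
        intro a ha b hb
        rw [List.mem_singleton] at hb
        subst hb
        exact (hmem a ha).2⟩
    · intro p hp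
      rw [List.mem_append, List.mem_singleton] at hp
      rcases hp with hp | rfl
      · exact ⟨(hmem p hp).1, by have := (hmem p hp).2; split <;> omega⟩
      · exact ⟨hdp, by split <;> omega⟩
    · rw [hpf]
      have hxpf : x.primeFactors = insert d (pvStrip d x).primeFactors := by
        ext q
        rw [Nat.mem_primeFactors, Finset.mem_insert, Nat.mem_primeFactors]
        constructor
        · rintro ⟨hq, hqx, -⟩
          rcases (pvStrip_prime_dvd_iff d x q hdp hq hx hdvd).mp hqx with rfl | hh
          · exact Or.inl rfl
          · exact Or.inr ⟨hq, hh, by omega⟩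
        · rintro (rfl | ⟨hq, hh, -⟩)
          · exact ⟨hdp, hdvd, by omega⟩
          · exact ⟨hq, dvd_trans hh (pvStrip_dvd d x), by omega⟩
      rw [hxpf, List.toFinset_append]
      ext q
      simp only [Finset.mem_union, Finset.mem_insert, List.toFinset_cons, List.toFinset_nil,
        insert_empty_eq, Finset.mem_singleton, List.mem_toFinset]
      tauto
  | case2 d x ps h hmod ih =>
    intro hd hodd hx hmin hpair hmem hpf
    have hndvd : ¬ d ∣ x := fun hdvd => hmod (Nat.mod_eq_zero_of_dvd hdvd)
    apply ih
    · split <;> omega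
    · right; split <;> omega
    · exact hx
    · exact pv_next_min d x hd hodd hndvd hmin
    · exact hpair
    · intro p hp
      exact ⟨(hmem p hp).1, by have := (hmem p hp).2; split <;> omega⟩
    · exact hpf
  | case3 d x ps h =>
    intro hd hodd hx hmin hpair hmem hpf
    have hlt : x < d * d := by
      by_contra hle
      exact h ⟨hd, by omega⟩
    refine ⟨hx, hpair, fun p hp => (hmem p hp).1, ?_, hpf⟩
    intro hx1
    have hxp : x.Prime := pv_prime_of_min_factor d x hd hx1 hlt hmin
    refine ⟨hxp, fun p hp => ?_⟩
    have hdx : d ≤ x := le_trans (hmin _ (Nat.minFac_prime (by omega)) (Nat.minFac_dvd x))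
      (Nat.minFac_le (by omega))
    have := (hmem p hp).2
    omega

-- B-side: the collected prime list is exactly the distinct prime factors of g
-- (proved via the loop invariant further below)
theorem pvPrimesB_final (g : Nat) (hg : 1 ≤ g) :
    ((if 1 < (pvPrimesLoop 2 g []).2
        then (pvPrimesLoop 2 g []).1 ++ [(pvPrimesLoop 2 g []).2]
        else (pvPrimesLoop 2 g []).1)).Nodup ∧
    ((if 1 < (pvPrimesLoop 2 g []).2
        then (pvPrimesLoop 2 g []).1 ++ [(pvPrimesLoop 2 g []).2]
        else (pvPrimesLoop 2 g []).1)).toFinset = g.primeFactors := by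
  obtain ⟨h1, h2, h3, h4, h5⟩ := pvPrimesLoop_inv g 2 g []
    (le_refl 2) (Or.inl rfl) hg
    (fun q hq _ => hq.two_le)
    (List.Pairwise.nil) (by simp) (by simp)
  by_cases hx : 1 < (pvPrimesLoop 2 g []).2
  · rw [if_pos hx]
    obtain ⟨hxp, hlt⟩ := h4 hx
    constructor
    · refine (List.pairwise_append.mpr ⟨h2, List.pairwise_singleton _ _, ?_⟩).imp ?_
      · intro a ha b hb
        rw [List.mem_singleton] at hb
        subst hb
        exact hlt a ha
      · exact fun hab => Nat.ne_of_lt hab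
    · rw [List.toFinset_append, h5, Nat.Prime.primeFactors hxp]
      ext q
      simp only [Finset.mem_union, List.toFinset_cons, List.toFinset_nil, insert_empty_eq,
        Finset.mem_singleton, List.mem_toFinset]
  · rw [if_neg hx]
    have hone : (pvPrimesLoop 2 g []).2 = 1 := by omega
    constructor
    · exact h2.imp (fun hab => Nat.ne_of_lt hab)
    · rw [h5, hone]
      simp

theorem pv_sums_eq (mN aN g : Nat) (hg : 1 ≤ g) :
    ((pvDivisorsA g).foldl
      (fun s e => s + pvMobiusA e * ((Nat.choose (mN / e) (aN / e) : Nat) : Int)) 0)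
    = pvSignedSum mN aN
        (let r := pvPrimesLoop 2 g []
         if 1 < r.2 then r.1 ++ [r.2] else r.1) 1 := by
  obtain ⟨hnd, hfs⟩ := pvPrimesB_final g hg
  rw [pvA_sum mN aN g hg,
    pv_moebius_sum_eq_powerset g hg (fun e => ((Nat.choose (mN / e) (aN / e) : Nat) : Int))]
  simp only []
  rw [pvSignedSum_powerset mN aN _ hnd 1, hfs]
  apply Finset.sum_congr rfl
  intro S _
  rw [one_mul]

-- ===== VERDICT (by name: the statement is the Claim_ definition above) =====
theorem n_prim_py_spec : Claim_equal_n_prim_py := by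
  intro m a _hdom hpre
  unfold Spec_n_prim_py n_prim_py n_prim_py_alt
  have hm : ¬ m ≤ 0 := by unfold Pre_n_prim_py at hpre; omega
  simp only [hm, if_false]
  by_cases ha : a < 0 ∨ m < a
  · simp [ha]
  · simp only [ha, if_false]
    have hg : 1 ≤ Nat.gcd m.toNat a.toNat := by
      have : 0 < m.toNat := by omega
      exact Nat.le_of_lt_succ (by
        have := Nat.gcd_pos_of_pos_left (n := a.toNat) this
        omega)
    rw [pv_sums_eq m.toNat a.toNat _ hg]
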